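-- pv_equiv track=rewrite | github.com/idk-who/Aaditya-More_Software-Development | main.py | if_present_then_remove
-- ===== SOURCE A (Python) =====
-- def if_present_then_remove(d1, d2):
--     """
--
--     d1 and d2 are dictrionaries with chars
--
--     if all of d2 are present in d1 one or more times
--         then remove those chars
--     return the number of times d2 is present
--
--     """
--
--     ## making a copy to avoid modifying original d1
--     d1_copy = d1.copy()
--
--     ## initalizing count
--     count = 0
--
--     ## whether or not d2 is found in d1
--     increase_count = True
--
--     while True:
--         ## check if every digit of d2 is present in d1
--         ## and if prsent then reduce its count
--         for i in d2:
--             n = d1_copy.get(i, 0)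
--             if n > 0:
--                 d1_copy[i] = n-1
--             else:
--                 ## digit(ie. d2) is no longer present leave the loop
--                 increase_count = False
--                 break
--
--         ## either increase count or stop looping
--         if increase_count:
--             ## change d1 only if d2 is present
--             d1 = d1_copy.copy()
--             count=count+1
--         else:
--             break
--
--     return d1, count
-- ===== SOURCE B (Python) =====
-- def if_present_then_remove(d1, d2):
--     count = min(d1.get(i, 0) for i in d2)
--     if count < 0:
--         count = 0
--     return {k: (v - count if k in d2 else v) for k, v in d1.items()}, count
-- ===== Notes on version B (the rewrite author's own statement) =====
-- stated objective: alternative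
-- what changed: A repeatedly runs full subtraction rounds over d2 until one fails; B computes the round count in closed form as the (clamped) minimum of d1.get(k,0) over d2's keys and builds the result dict in a single pass over d1.
-- outside the precondition, e.g. on if_present_then_remove({'a': 1}, {}): A does not finish within the time limit, B raises ValueError
import Mathlib
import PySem

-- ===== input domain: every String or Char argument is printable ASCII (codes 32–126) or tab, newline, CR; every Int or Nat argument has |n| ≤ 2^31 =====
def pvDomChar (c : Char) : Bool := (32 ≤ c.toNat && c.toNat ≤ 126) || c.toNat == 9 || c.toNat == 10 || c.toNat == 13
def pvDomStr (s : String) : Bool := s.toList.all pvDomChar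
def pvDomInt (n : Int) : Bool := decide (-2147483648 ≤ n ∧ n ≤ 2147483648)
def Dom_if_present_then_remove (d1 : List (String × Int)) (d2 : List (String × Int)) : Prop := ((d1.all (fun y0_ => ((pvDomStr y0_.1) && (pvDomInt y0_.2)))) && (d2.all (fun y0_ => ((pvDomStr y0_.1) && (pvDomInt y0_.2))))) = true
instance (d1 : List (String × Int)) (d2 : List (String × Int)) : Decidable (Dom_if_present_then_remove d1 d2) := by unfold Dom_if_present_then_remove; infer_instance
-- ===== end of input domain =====

-- B replaces A's repeated subtraction rounds by a closed-form count (the clamped minimum over d2's keys) and one pass over d1.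


-- ===== PORT A =====
-- the inner 'for i in d2' pass: decrement each key if positive, else break (none)
def pvPass (d : PySem.Dict String Int) : List String → Option (PySem.Dict String Int)
  | [] => some d
  | i :: ks =>
    let n := PySem.Dict.getD d i 0
    if n > 0 then pvPass (PySem.Dict.insert d i (n - 1)) ks else none

-- the 'while True' loop; fuel is only a totality guard (the proof shows it is never exhausted)
def pvLoop : Nat → PySem.Dict String Int → PySem.Dict String Int → Int → List String → PySem.Dict String Int × Int
  | 0, dOrig, _, c, _ => (dOrig, c)
  | fuel + 1, dOrig, dCopy, c, ks =>
    match pvPass dCopy ks with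
    | some d' => pvLoop fuel d' d' (c + 1) ks
    | none => (dOrig, c)

def if_present_then_remove (d1 : List (String × Int)) (d2 : List (String × Int)) : (List (String × Int)) × Int :=
  let ks := PySem.Dict.keys (PySem.Dict.mk d2)
  let fuel := (d1.map (fun p => p.2.toNat)).sum + 1
  let r := pvLoop fuel (PySem.Dict.mk d1) (PySem.Dict.mk d1) 0 ks
  (r.1.items, r.2)

-- ===== PORT B =====
def if_present_then_remove_alt (d1 : List (String × Int)) (d2 : List (String × Int)) : (List (String × Int)) × Int :=
  let ks := d2.map Prod.fst
  let m := (PySem.List.min? (ks.map (fun k => PySem.Dict.getD (PySem.Dict.mk d1) k 0)) (fun x => x)).getD 0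
  let count := if m < 0 then 0 else m
  (d1.map (fun p => if p.1 ∈ ks then (p.1, p.2 - count) else p), count)

-- ===== PRECONDITION & SPEC =====
-- Pre_ excludes empty d2, on which A loops forever (and B raises ValueError), and association
-- lists with duplicate keys, which are not valid encodings of the Python dicts A receives.
def Pre_if_present_then_remove (d1 : List (String × Int)) (d2 : List (String × Int)) : Prop :=
  d2 ≠ [] ∧ (d1.map Prod.fst).Nodup ∧ (d2.map Prod.fst).Nodup
instance (d1 : List (String × Int)) (d2 : List (String × Int)) : Decidable (Pre_if_present_then_remove d1 d2) := by unfold Pre_if_present_then_remove; infer_instance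

def pvWitness_if_present_then_remove : (List (String × Int)) × (List (String × Int)) :=
  ([("a", 2), ("b", 5)], [("a", 1)])

def Spec_if_present_then_remove (d1 : List (String × Int)) (d2 : List (String × Int)) (out : (List (String × Int)) × Int) : Prop := out = if_present_then_remove_alt d1 d2
instance (d1 : List (String × Int)) (d2 : List (String × Int)) (out : (List (String × Int)) × Int) : Decidable (Spec_if_present_then_remove d1 d2 out) := by unfold Spec_if_present_then_remove; infer_instance

-- ===== CLAIM (what is proved, stated in full; the proofs are below) =====
def Claim_equal_if_present_then_remove : Prop := ∀ (d1 : List (String × Int)) (d2 : List (String × Int)), Dom_if_present_then_remove d1 d2 → Pre_if_present_then_remove d1 d2 → Spec_if_present_then_remove d1 d2 (if_present_then_remove d1 d2)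

-- ===== LEMMAS AND PROOFS =====

-- d1 with every key of ks reduced by j (B's one-pass result, parametrised by the round number)
def pvSub (d1 : List (String × Int)) (ks : List String) (j : Int) : List (String × Int) :=
  d1.map (fun p => if p.1 ∈ ks then (p.1, p.2 - j) else p)

lemma pvGet?_sub (l : List (String × Int)) (ks : List String) (j : Int) (k : String) :
    PySem.Dict.get? (PySem.Dict.mk (pvSub l ks j)) k
      = (PySem.Dict.get? (PySem.Dict.mk l) k).map (fun v => if k ∈ ks then v - j else v) := by
  induction l with
  | nil => rfl
  | cons p t ih =>
    obtain ⟨a, b⟩ := p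
    simp only [pvSub] at ih ⊢
    by_cases hin : a ∈ ks <;>
      simp only [List.map_cons, hin, if_true, if_false, PySem.Dict.get?_mk_cons] <;>
      by_cases hpk : a == k
    · have hk := eq_of_beq hpk; subst hk
      simp [hin]
    · simp [hpk, ih]
    · have hk := eq_of_beq hpk; subst hk
      simp [hin]
    · simp [hpk, ih]

lemma pvGetD_sub (l : List (String × Int)) (ks : List String) (j : Int) (k : String) :
    PySem.Dict.getD (PySem.Dict.mk (pvSub l ks j)) k 0
      = if k ∈ ks ∧ (PySem.Dict.mk l).contains k
        then PySem.Dict.getD (PySem.Dict.mk l) k 0 - j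
        else PySem.Dict.getD (PySem.Dict.mk l) k 0 := by
  rw [PySem.Dict.getD_eq_get?_getD, PySem.Dict.getD_eq_get?_getD, pvGet?_sub]
  rcases hget : PySem.Dict.get? (PySem.Dict.mk l) k with _ | v
  · have hc : (PySem.Dict.mk l).contains k = false := by
      rw [PySem.Dict.contains_eq_isSome_get?, hget]; rfl
    simp [hc]
  · have hc : (PySem.Dict.mk l).contains k = true := by
      rw [PySem.Dict.contains_eq_isSome_get?, hget]; rfl
    by_cases hin : k ∈ ks <;> simp [hc, hin]

lemma pvPass_eq (ks : List String) (d : PySem.Dict String Int) (hks : ks.Nodup) :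
    pvPass d ks = if ∀ k ∈ ks, 0 < PySem.Dict.getD d k 0
      then some (ks.foldl (fun d k => PySem.Dict.insert d k (PySem.Dict.getD d k 0 - 1)) d)
      else none := by
  induction ks generalizing d with
  | nil => simp [pvPass]
  | cons i t ih =>
    simp only [pvPass]
    by_cases h : 0 < PySem.Dict.getD d i 0
    · rw [if_pos h, ih _ (List.Nodup.of_cons hks)]
      have hiff : (∀ k ∈ t, 0 < PySem.Dict.getD (PySem.Dict.insert d i (PySem.Dict.getD d i 0 - 1)) k 0)
          ↔ (∀ k ∈ t, 0 < PySem.Dict.getD d k 0) := by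
        refine forall₂_congr (fun k hk => ?_)
        have hne : k ≠ i := fun h' => (List.nodup_cons.mp hks).1 (h' ▸ hk)
        rw [PySem.Dict.getD_insert_of_ne _ _ _ hne]
      simp only [List.foldl_cons, List.mem_cons, forall_eq_or_imp]
      by_cases hall : ∀ k ∈ t, 0 < PySem.Dict.getD d k 0
      · rw [if_pos (hiff.mpr hall), if_pos ⟨h, hall⟩]
      · rw [if_neg (fun hc => hall (hiff.mp hc)), if_neg (fun hc => hall hc.2)]
    · rw [if_neg h, if_neg]
      push Not
      exact ⟨i, List.mem_cons_self, le_of_not_gt h⟩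

lemma pvFoldl_dec (ks : List String) (l : List (String × Int)) (hks : ks.Nodup)
    (hl : (l.map Prod.fst).Nodup)
    (hc : ∀ k ∈ ks, (PySem.Dict.mk l).contains k = true) :
    (ks.foldl (fun d k => PySem.Dict.insert d k (PySem.Dict.getD d k 0 - 1)) (PySem.Dict.mk l))
      = PySem.Dict.mk (pvSub l ks 1) := by
  induction ks generalizing l with
  | nil =>
    simp [pvSub]
  | cons k t ih =>
    have hck := hc k (List.mem_cons_self)
    have hknt : k ∉ t := (List.nodup_cons.mp hks).1
    set v : Int := PySem.Dict.getD (PySem.Dict.mk l) k 0 - 1 with hv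
    have hins : PySem.Dict.insert (PySem.Dict.mk l) k v
        = PySem.Dict.mk (l.map (fun p => if p.1 == k then (k, v) else p)) := by
      apply PySem.Dict.ext
      rw [PySem.Dict.items_insert_of_contains _ _ hck]
    set l' := l.map (fun p => if p.1 == k then (k, v) else p) with hl'
    have hfst : l'.map Prod.fst = l.map Prod.fst := by
      rw [hl', List.map_map]
      refine List.map_congr_left (fun p _ => ?_)
      by_cases hpk : p.1 = k <;> simp [Function.comp, hpk]
    have hcont : ∀ k', (PySem.Dict.mk l').contains k' = (PySem.Dict.mk l).contains k' := by
      intro k'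
      rw [PySem.Dict.contains_eq_decide_mem_keys, PySem.Dict.contains_eq_decide_mem_keys]
      show decide (k' ∈ l'.map Prod.fst) = decide (k' ∈ l.map Prod.fst)
      rw [hfst]
    rw [List.foldl_cons, ← hv, hins, ih l' (List.Nodup.of_cons hks) (hfst ▸ hl) (fun k' hk' => (hcont k').trans (hc k' (List.mem_cons_of_mem _ hk')))]
    apply congrArg
    rw [pvSub, pvSub, hl', List.map_map]
    refine List.map_congr_left (fun p hp => ?_)
    by_cases hpk : p.1 = k
    · have hb : (p.1 == k) = true := beq_iff_eq.mpr hpk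
      have hmem : (k, p.2) ∈ (PySem.Dict.mk l).items := by
        show (k, p.2) ∈ l
        exact hpk ▸ hp
      have hgd : PySem.Dict.getD (PySem.Dict.mk l) k 0 = p.2 :=
        PySem.Dict.getD_of_mem_items _ hmem hl 0
      simp [Function.comp, hknt, hpk, hv, hgd]
    · have hb : (p.1 == k) = false := by simp [hpk]
      simp only [Function.comp, hb, List.mem_cons]
      by_cases hin : p.1 ∈ t <;> simp [hin, hpk]

lemma pvSub_sub (l : List (String × Int)) (ks : List String) (j : Int) :
    pvSub (pvSub l ks j) ks 1 = pvSub l ks (j + 1) := by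
  rw [pvSub, pvSub, pvSub, List.map_map]
  refine List.map_congr_left (fun p _ => ?_)
  by_cases h : p.1 ∈ ks
  · simp [Function.comp, h]; ring
  · simp [Function.comp, h]

lemma pvGetD_le_sum (l : List (String × Int)) (k : String) :
    PySem.Dict.getD (PySem.Dict.mk l) k 0 ≤ (((l.map (fun p => p.2.toNat)).sum : Nat) : Int) := by
  induction l with
  | nil => simp [PySem.Dict.getD_eq_get?_getD]; rfl
  | cons p t ih =>
    rw [PySem.Dict.getD_eq_get?_getD, PySem.Dict.get?_mk_cons]
    rw [PySem.Dict.getD_eq_get?_getD] at ih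
    by_cases hb : (p.1 == k) = true
    · rw [if_pos hb]
      simp only [Option.getD_some, List.map_cons, List.sum_cons, Nat.cast_add]
      have h1 := Int.self_le_toNat p.2
      omega
    · rw [if_neg hb]
      simp only [List.map_cons, List.sum_cons, Nat.cast_add]
      omega

lemma pvLoop_eq (d1 : List (String × Int)) (ks : List String)
    (hd1 : (d1.map Prod.fst).Nodup) (hks : ks.Nodup)
    (m : Int)
    (hm : PySem.List.min? (ks.map (fun k => PySem.Dict.getD (PySem.Dict.mk d1) k 0)) (fun x => x) = some m)
    (count : Int) (hcount : count = if m < 0 then 0 else m) :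
    ∀ (fuel : Nat) (j c : Int), 0 ≤ j → j ≤ count → (count - j).toNat < fuel →
      pvLoop fuel (PySem.Dict.mk (pvSub d1 ks j)) (PySem.Dict.mk (pvSub d1 ks j)) c ks
        = (PySem.Dict.mk (pvSub d1 ks count), c + (count - j)) := by
  have hfst_sub : ∀ j', ((pvSub d1 ks j').map Prod.fst) = d1.map Prod.fst := by
    intro j'
    rw [pvSub, List.map_map]
    refine List.map_congr_left (fun p _ => ?_)
    by_cases h : p.1 ∈ ks <;> simp [Function.comp, h]
  have hcont_sub : ∀ j' k, (PySem.Dict.mk (pvSub d1 ks j')).contains k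
      = (PySem.Dict.mk d1).contains k := by
    intro j' k
    rw [PySem.Dict.contains_eq_decide_mem_keys, PySem.Dict.contains_eq_decide_mem_keys]
    show decide (k ∈ (pvSub d1 ks j').map Prod.fst) = decide (k ∈ d1.map Prod.fst)
    rw [hfst_sub]
  have hmle : ∀ k ∈ ks, m ≤ PySem.Dict.getD (PySem.Dict.mk d1) k 0 := by
    intro k hk
    exact PySem.List.min?_isMin hm _ (List.mem_map_of_mem hk)
  intro fuel
  induction fuel with
  | zero => intro j c _ _ h; omega
  | succ n ih =>
    intro j c hj0 hjc hfuel
    simp only [pvLoop]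
    rw [pvPass_eq _ _ hks]
    by_cases hj : j < count
    · have hcpos : 0 < count := lt_of_le_of_lt hj0 hj
      have hcm : count = m := by
        rw [hcount]; split
        · omega
        · rfl
      have hcontall : ∀ k ∈ ks, (PySem.Dict.mk d1).contains k = true := by
        intro k hk
        by_contra hcf
        have h0 : PySem.Dict.getD (PySem.Dict.mk d1) k 0 = 0 :=
          PySem.Dict.getD_of_not_contains _ _ (Bool.not_eq_true _ ▸ eq_false_of_ne_true hcf)
        have := hmle k hk
        omega
    
      have hpos : ∀ k ∈ ks, 0 < PySem.Dict.getD (PySem.Dict.mk (pvSub d1 ks j)) k 0 := by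
        intro k hk
        rw [pvGetD_sub, if_pos ⟨hk, hcontall k hk⟩]
        have := hmle k hk
        omega
      rw [if_pos hpos, pvFoldl_dec ks _ hks (hfst_sub j ▸ hd1)
        (fun k hk => (hcont_sub j k).trans (hcontall k hk)), pvSub_sub]
      show pvLoop n (PySem.Dict.mk (pvSub d1 ks (j + 1))) (PySem.Dict.mk (pvSub d1 ks (j + 1))) (c + 1) ks
        = (PySem.Dict.mk (pvSub d1 ks count), c + (count - j))
      rw [ih (j + 1) (c + 1) (by omega) (by omega) (by omega)]
      refine Prod.ext rfl ?_
      show c + 1 + (count - (j + 1)) = c + (count - j)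
      ring
    · have hjeq : j = count := le_antisymm hjc (not_lt.mp hj)
      obtain ⟨k0, hk0, hgk0⟩ := List.mem_map.mp (PySem.List.min?_mem hm)
      have hnall : ¬ ∀ k ∈ ks, 0 < PySem.Dict.getD (PySem.Dict.mk (pvSub d1 ks j)) k 0 := by
        intro hall
        have := hall k0 hk0
        rw [pvGetD_sub] at this
        have hcle : m ≤ count := by rw [hcount]; split <;> omega
        by_cases hco : (PySem.Dict.mk d1).contains k0 = true
        · rw [if_pos ⟨hk0, hco⟩, hgk0, hjeq] at this
          omega
        · rw [if_neg (fun hc => hco hc.2)] at this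
          rw [PySem.Dict.getD_of_not_contains _ _ (Bool.eq_false_iff.mpr hco)] at this
          omega
      rw [if_neg hnall]
      show (PySem.Dict.mk (pvSub d1 ks j), c) = (PySem.Dict.mk (pvSub d1 ks count), c + (count - j))
      rw [hjeq]
      refine Prod.ext rfl ?_
      show c = c + (count - count)
      ring

-- ===== VERDICT (by name: the statement is the Claim_ definition above) =====
theorem if_present_then_remove_spec : Claim_equal_if_present_then_remove := by
  intro d1 d2 _ hpre
  obtain ⟨hne, hd1, hd2⟩ := hpre
  have hksne : (d2.map Prod.fst) ≠ [] := by simpa using hne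
  obtain ⟨m, hm⟩ : ∃ m, PySem.List.min?
      ((d2.map Prod.fst).map (fun k => PySem.Dict.getD (PySem.Dict.mk d1) k 0)) (fun x => x) = some m := by
    cases h : PySem.List.min?
        ((d2.map Prod.fst).map (fun k => PySem.Dict.getD (PySem.Dict.mk d1) k 0)) (fun x => x) with
    | none =>
      have h0 := (PySem.List.min?_eq_none_iff _ _).mp h
      rw [List.map_eq_nil_iff] at h0
      exact absurd h0 hksne
    | some m => exact ⟨m, rfl⟩
  set count : Int := if m < 0 then 0 else m with hcount
  have h0c : 0 ≤ count := by rw [hcount]; split <;> omega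
  have hcsum : count ≤ (((d1.map (fun p => p.2.toNat)).sum : Nat) : Int) := by
    have hnn : (0:Int) ≤ (((d1.map (fun p => p.2.toNat)).sum : Nat) : Int) := Int.natCast_nonneg _
    rw [hcount]; split
    · exact hnn
    · obtain ⟨k0, hk0, hgk0⟩ := List.mem_map.mp (PySem.List.min?_mem hm)
      calc m = PySem.Dict.getD (PySem.Dict.mk d1) k0 0 := hgk0.symm
        _ ≤ _ := pvGetD_le_sum d1 k0
  have hsub0 : pvSub d1 (d2.map Prod.fst) 0 = d1 := by
    have hp : ∀ p ∈ d1, (if p.1 ∈ d2.map Prod.fst then (p.1, p.2 - 0) else p) = p := by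
      intro p _; split <;> simp
    rw [pvSub]
    exact (List.map_congr_left hp).trans (List.map_id _)
  have key := pvLoop_eq d1 (d2.map Prod.fst) hd1 hd2 m hm count hcount
      ((d1.map (fun p => p.2.toNat)).sum + 1) 0 0 le_rfl h0c (by omega)
  rw [hsub0] at key
  unfold Spec_if_present_then_remove if_present_then_remove if_present_then_remove_alt
  simp only [hm, Option.getD_some]
  rw [show PySem.Dict.keys (PySem.Dict.mk d2) = d2.map Prod.fst from rfl]
  rw [key]
  show (pvSub d1 (d2.map Prod.fst) count, (0:Int) + (count - 0))
    = (pvSub d1 (d2.map Prod.fst) count, count)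
  refine Prod.ext rfl ?_
  show (0:Int) + (count - 0) = count
  ring
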